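-- pv_equiv track=rewrite | github.com/jamesbooth93/project-test | benchmarks.py | _scenario_one_route_actions
-- ===== SOURCE A (Python) =====
-- def _scenario_one_route_actions(route_name, week, focal, hidden):
--     if route_name == "blind":
--         return []
--     if route_name == "high_strain_count":
--         route = {
--             1: [{"type": "quick_check_in", "target": focal}],
--             2: [{"type": "offer_coaching_support", "target": focal}],
--             3: [{"type": "group_mediation", "target": focal}],
--             4: [{"type": "clarify_roles_and_handoffs", "target": focal}],
--             5: [{"type": "quick_check_in", "target": focal}],
--             6: [{"type": "group_mediation", "target": focal}],
--         }
--         return [action for action in route.get(week, []) if action.get("target") is not None]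
--     if route_name == "more_strain_than_needed":
--         route = {
--             1: [{"type": "quick_check_in", "target": focal}],
--             2: [{"type": "group_mediation", "target": focal}],
--             3: [
--                 {"type": "quick_check_in", "target": focal},
--                 {"type": "quick_check_in", "target": hidden},
--             ],
--             4: [
--                 {"type": "clarify_roles_and_handoffs", "target": focal},
--                 {"type": "quick_check_in", "target": hidden},
--             ],
--             5: [{"type": "quick_check_in", "target": focal}],
--             6: [{"type": "quick_check_in", "target": hidden}],
--         }
--         return [action for action in route.get(week, []) if action.get("target") is not None]
--     if route_name == "well_done":
--         route = {
--             1: [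
--                 {"type": "quick_check_in", "target": focal},
--                 {"type": "clarify_roles_and_handoffs", "target": focal},
--             ],
--             2: [
--                 {"type": "offer_coaching_support", "target": focal},
--                 {"type": "group_mediation", "target": focal},
--             ],
--             3: [
--                 {"type": "group_mediation", "target": focal},
--                 {"type": "quick_check_in", "target": hidden},
--             ],
--             4: [
--                 {"type": "clarify_roles_and_handoffs", "target": focal},
--                 {"type": "quick_check_in", "target": hidden},
--             ],
--             5: [{"type": "quick_check_in", "target": focal}],
--             6: [
--                 {"type": "group_mediation", "target": focal},
--                 {"type": "quick_check_in", "target": hidden},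
--             ],
--         }
--         return [action for action in route.get(week, []) if action.get("target") is not None]
--     if route_name == "visible_only":
--         route = {
--             1: [{"type": "quick_check_in", "target": focal}],
--             2: [{"type": "offer_coaching_support", "target": focal}],
--             3: [{"type": "reduce_workload", "target": focal}],
--             4: [{"type": "quick_check_in", "target": focal}],
--             5: [{"type": "offer_coaching_support", "target": focal}],
--             6: [{"type": "quick_check_in", "target": focal}],
--         }
--         return [action for action in route.get(week, []) if action.get("target") is not None]
--     if route_name == "late_shift":
--         route = {
--             1: [{"type": "quick_check_in", "target": focal}],
--             2: [{"type": "offer_coaching_support", "target": focal}],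
--             3: [
--                 {"type": "group_mediation", "target": focal},
--                 {"type": "quick_check_in", "target": hidden},
--             ],
--             4: [
--                 {"type": "clarify_roles_and_handoffs", "target": focal},
--                 {"type": "quick_check_in", "target": hidden},
--             ],
--             5: [{"type": "quick_check_in", "target": hidden}],
--             6: [
--                 {"type": "clarify_roles_and_handoffs", "target": focal},
--                 {"type": "quick_check_in", "target": hidden},
--             ],
--         }
--         return [action for action in route.get(week, []) if action.get("target") is not None]
--     if route_name == "early_read":
--         return None
--     raise ValueError(f"Unknown scenario_01 route: {route_name}")
-- ===== SOURCE B (Python) =====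
-- # B: decodes a compact per-week character schedule (one code string per route,
-- # uppercase letter = hidden target) instead of building six parallel
-- # week -> list-of-dicts tables and filtering them.
--
-- _ACTION = {
--     "q": "quick_check_in",
--     "o": "offer_coaching_support",
--     "g": "group_mediation",
--     "c": "clarify_roles_and_handoffs",
--     "r": "reduce_workload",
-- }
--
-- _SCHEDULE = {
--     "blind": "|||||",
--     "high_strain_count": "q|o|g|c|q|g",
--     "more_strain_than_needed": "q|g|qQ|cQ|q|Q",
--     "well_done": "qc|og|gQ|cQ|q|gQ",
--     "visible_only": "q|o|r|q|o|q",
--     "late_shift": "q|o|gQ|cQ|Q|cQ",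
-- }
--
--
-- def _scenario_one_route_actions(route_name, week, focal, hidden):
--     if route_name == "early_read":
--         return None
--     if route_name not in _SCHEDULE:
--         raise ValueError(f"Unknown scenario_01 route: {route_name}")
--     cells = _SCHEDULE[route_name].split("|")
--     code = cells[week - 1] if 1 <= week <= 6 else ""
--     actions = []
--     for ch in code:
--         target = hidden if ch.isupper() else focal
--         if target is not None:
--             actions.append({"type": _ACTION[ch.lower()], "target": target})
--     return actions
-- ===== Notes on version B (the rewrite author's own statement) =====
-- stated objective: alternative
-- what changed: Replaces A's six parallel if-branches, each rebuilding its own week->list-of-dicts table and filtering it, by a compact per-route character-encoded schedule string that is split and decoded (lowercase = focal, uppercase = hidden) into the action dicts in one loop.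
import Mathlib
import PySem

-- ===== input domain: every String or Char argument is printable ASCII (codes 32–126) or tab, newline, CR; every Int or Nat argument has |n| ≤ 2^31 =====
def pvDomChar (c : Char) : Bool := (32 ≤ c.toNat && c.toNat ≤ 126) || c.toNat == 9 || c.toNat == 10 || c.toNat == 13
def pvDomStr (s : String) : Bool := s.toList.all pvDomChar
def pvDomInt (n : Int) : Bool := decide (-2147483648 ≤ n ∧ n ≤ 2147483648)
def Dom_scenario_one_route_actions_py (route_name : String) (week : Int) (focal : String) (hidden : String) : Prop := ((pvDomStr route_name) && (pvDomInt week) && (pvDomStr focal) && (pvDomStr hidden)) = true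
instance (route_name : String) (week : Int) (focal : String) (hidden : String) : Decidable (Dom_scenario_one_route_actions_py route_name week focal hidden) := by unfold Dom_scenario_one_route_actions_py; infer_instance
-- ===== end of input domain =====

-- B decodes a compact per-route character-encoded schedule string (lowercase = focal,
-- uppercase = hidden) instead of A's six parallel branches each rebuilding and filtering
-- its own week→list-of-dicts table; same value on every route name A handles
-- (Pre_ excludes exactly the unknown route names, on which both programs raise ValueError).

-- ===== PORT A =====
-- the shared comprehension `[a for a in route.get(week, []) if a.get("target") is not None]`
-- (focal/hidden are Strings here, never None, so the filter keeps every action)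
def pvFilterA (xs : List (List (String × String))) : List (List (String × String)) :=
  xs.filter (fun a => ((PySem.Dict.mk a).get? "target").isSome)

def scenario_one_route_actions_py (route_name : String) (week : Int) (focal : String) (hidden : String) : Option (List (List (String × String))) :=
  if route_name = "blind" then some []
  else if route_name = "high_strain_count" then
    let route : PySem.Dict Int (List (List (String × String))) := PySem.Dict.mk [
      ((1 : Int), [[("type", "quick_check_in"), ("target", focal)]]),
      ((2 : Int), [[("type", "offer_coaching_support"), ("target", focal)]]),
      ((3 : Int), [[("type", "group_mediation"), ("target", focal)]]),
      ((4 : Int), [[("type", "clarify_roles_and_handoffs"), ("target", focal)]]),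
      ((5 : Int), [[("type", "quick_check_in"), ("target", focal)]]),
      ((6 : Int), [[("type", "group_mediation"), ("target", focal)]])]
    some (pvFilterA (route.getD week []))
  else if route_name = "more_strain_than_needed" then
    let route : PySem.Dict Int (List (List (String × String))) := PySem.Dict.mk [
      ((1 : Int), [[("type", "quick_check_in"), ("target", focal)]]),
      ((2 : Int), [[("type", "group_mediation"), ("target", focal)]]),
      ((3 : Int), [[("type", "quick_check_in"), ("target", focal)], [("type", "quick_check_in"), ("target", hidden)]]),
      ((4 : Int), [[("type", "clarify_roles_and_handoffs"), ("target", focal)], [("type", "quick_check_in"), ("target", hidden)]]),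
      ((5 : Int), [[("type", "quick_check_in"), ("target", focal)]]),
      ((6 : Int), [[("type", "quick_check_in"), ("target", hidden)]])]
    some (pvFilterA (route.getD week []))
  else if route_name = "well_done" then
    let route : PySem.Dict Int (List (List (String × String))) := PySem.Dict.mk [
      ((1 : Int), [[("type", "quick_check_in"), ("target", focal)], [("type", "clarify_roles_and_handoffs"), ("target", focal)]]),
      ((2 : Int), [[("type", "offer_coaching_support"), ("target", focal)], [("type", "group_mediation"), ("target", focal)]]),
      ((3 : Int), [[("type", "group_mediation"), ("target", focal)], [("type", "quick_check_in"), ("target", hidden)]]),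
      ((4 : Int), [[("type", "clarify_roles_and_handoffs"), ("target", focal)], [("type", "quick_check_in"), ("target", hidden)]]),
      ((5 : Int), [[("type", "quick_check_in"), ("target", focal)]]),
      ((6 : Int), [[("type", "group_mediation"), ("target", focal)], [("type", "quick_check_in"), ("target", hidden)]])]
    some (pvFilterA (route.getD week []))
  else if route_name = "visible_only" then
    let route : PySem.Dict Int (List (List (String × String))) := PySem.Dict.mk [
      ((1 : Int), [[("type", "quick_check_in"), ("target", focal)]]),
      ((2 : Int), [[("type", "offer_coaching_support"), ("target", focal)]]),
      ((3 : Int), [[("type", "reduce_workload"), ("target", focal)]]),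
      ((4 : Int), [[("type", "quick_check_in"), ("target", focal)]]),
      ((5 : Int), [[("type", "offer_coaching_support"), ("target", focal)]]),
      ((6 : Int), [[("type", "quick_check_in"), ("target", focal)]])]
    some (pvFilterA (route.getD week []))
  else if route_name = "late_shift" then
    let route : PySem.Dict Int (List (List (String × String))) := PySem.Dict.mk [
      ((1 : Int), [[("type", "quick_check_in"), ("target", focal)]]),
      ((2 : Int), [[("type", "offer_coaching_support"), ("target", focal)]]),
      ((3 : Int), [[("type", "group_mediation"), ("target", focal)], [("type", "quick_check_in"), ("target", hidden)]]),
      ((4 : Int), [[("type", "clarify_roles_and_handoffs"), ("target", focal)], [("type", "quick_check_in"), ("target", hidden)]]),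
      ((5 : Int), [[("type", "quick_check_in"), ("target", hidden)]]),
      ((6 : Int), [[("type", "clarify_roles_and_handoffs"), ("target", focal)], [("type", "quick_check_in"), ("target", hidden)]])]
    some (pvFilterA (route.getD week []))
  else if route_name = "early_read" then none
  else none  -- Python raises ValueError here; excluded by Pre_

-- ===== PORT B =====
-- module-level _ACTION and _SCHEDULE constants of Source B
def pvActionNames : PySem.Dict String String :=
  PySem.Dict.mk [
    ("q", "quick_check_in"),
    ("o", "offer_coaching_support"),
    ("g", "group_mediation"),
    ("c", "clarify_roles_and_handoffs"),
    ("r", "reduce_workload")]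

def pvSchedule : PySem.Dict String String :=
  PySem.Dict.mk [
    ("blind", "|||||"),
    ("high_strain_count", "q|o|g|c|q|g"),
    ("more_strain_than_needed", "q|g|qQ|cQ|q|Q"),
    ("well_done", "qc|og|gQ|cQ|q|gQ"),
    ("visible_only", "q|o|r|q|o|q"),
    ("late_shift", "q|o|gQ|cQ|Q|cQ")]

def scenario_one_route_actions_py_alt (route_name : String) (week : Int) (focal : String) (hidden : String) : Option (List (List (String × String))) :=
  if route_name = "early_read" then none
  else
    match pvSchedule.get? route_name with
    | none => none  -- Python raises ValueError here; excluded by Pre_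
    | some sched =>
      let cells := (PySem.Str.split? sched "|").getD []  -- sep "|" ≠ "" so split? is always some
      -- `cells[week-1] if 1 <= week <= 6 else ""`; the guard keeps the index in range
      -- (every schedule has 6 cells), so the total pyGetD form is exact
      let code := if 1 ≤ week ∧ week ≤ 6 then PySem.List.pyGetD cells (week - 1) "" else ""
      -- the for-loop; `target is not None` is always true for Strings, so the append is unconditional
      some (code.toList.foldl (fun acc ch =>
        let target := if PySem.Chars.isupper ch then hidden else focal
        acc ++ [[("type", (pvActionNames.get? (String.ofList [PySem.Chars.lowerChar ch])).getD ""), ("target", target)]]) [])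

-- ===== PRECONDITION & SPEC =====
-- Pre_ excludes exactly the unknown route names, on which A raises ValueError (and B does too).
def Pre_scenario_one_route_actions_py (route_name : String) (week : Int) (focal : String) (hidden : String) : Prop :=
  route_name ∈ ["blind", "high_strain_count", "more_strain_than_needed", "well_done", "visible_only", "late_shift", "early_read"]
instance (route_name : String) (week : Int) (focal : String) (hidden : String) : Decidable (Pre_scenario_one_route_actions_py route_name week focal hidden) := by unfold Pre_scenario_one_route_actions_py; infer_instance

def pvWitness_scenario_one_route_actions_py : String × Int × String × String := ("well_done", 3, "ana", "bob")

def Spec_scenario_one_route_actions_py (route_name : String) (week : Int) (focal : String) (hidden : String) (out : Option (List (List (String × String)))) : Prop := out = scenario_one_route_actions_py_alt route_name week focal hidden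
instance (route_name : String) (week : Int) (focal : String) (hidden : String) (out : Option (List (List (String × String)))) : Decidable (Spec_scenario_one_route_actions_py route_name week focal hidden out) := by unfold Spec_scenario_one_route_actions_py; infer_instance

-- ===== CLAIM =====
def Claim_equal_scenario_one_route_actions_py : Prop := ∀ (route_name : String) (week : Int) (focal : String) (hidden : String), Dom_scenario_one_route_actions_py route_name week focal hidden → Pre_scenario_one_route_actions_py route_name week focal hidden → Spec_scenario_one_route_actions_py route_name week focal hidden (scenario_one_route_actions_py route_name week focal hidden)

-- ===== LEMMAS AND PROOFS =====
-- per-route week case split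
theorem pvWeekCases (w : Int) : w = 1 ∨ w = 2 ∨ w = 3 ∨ w = 4 ∨ w = 5 ∨ w = 6 ∨ (w ≠ 1 ∧ w ≠ 2 ∧ w ≠ 3 ∧ w ≠ 4 ∧ w ≠ 5 ∧ w ≠ 6) := by omega

-- the six schedule strings, split once and for all
theorem pvSplit_blind : (PySem.Str.split? "|||||" "|").getD [] = ["", "", "", "", "", ""] := by decide
theorem pvSplit_hsc : (PySem.Str.split? "q|o|g|c|q|g" "|").getD [] = ["q", "o", "g", "c", "q", "g"] := by decide
theorem pvSplit_mstn : (PySem.Str.split? "q|g|qQ|cQ|q|Q" "|").getD [] = ["q", "g", "qQ", "cQ", "q", "Q"] := by decide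
theorem pvSplit_wd : (PySem.Str.split? "qc|og|gQ|cQ|q|gQ" "|").getD [] = ["qc", "og", "gQ", "cQ", "q", "gQ"] := by decide
theorem pvSplit_vo : (PySem.Str.split? "q|o|r|q|o|q" "|").getD [] = ["q", "o", "r", "q", "o", "q"] := by decide
theorem pvSplit_ls : (PySem.Str.split? "q|o|gQ|cQ|Q|cQ" "|").getD [] = ["q", "o", "gQ", "cQ", "Q", "cQ"] := by decide

-- ===== VERDICT =====
set_option maxHeartbeats 2000000 in
theorem scenario_one_route_actions_py_spec : Claim_equal_scenario_one_route_actions_py := by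
  intro route_name week focal hidden _ hpre
  unfold Pre_scenario_one_route_actions_py at hpre
  unfold Spec_scenario_one_route_actions_py
  fin_cases hpre <;>
    rcases pvWeekCases week with h | h | h | h | h | h | ⟨h1, h2, h3, h4, h5, h6⟩ <;>
    first
      | (subst h
         simp [scenario_one_route_actions_py, scenario_one_route_actions_py_alt, pvSchedule,
               pvActionNames, pvFilterA, PySem.Dict.getD, PySem.Dict.get?_mk_cons,
               pvSplit_blind, pvSplit_hsc, pvSplit_mstn, pvSplit_wd, pvSplit_vo, pvSplit_ls,
               PySem.List.pyGetD, PySem.Chars.isupper, PySem.Chars.lowerChar])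
      | (have b1 : ((1 : Int) == week) = false := by simp; omega
         have b2 : ((2 : Int) == week) = false := by simp; omega
         have b3 : ((3 : Int) == week) = false := by simp; omega
         have b4 : ((4 : Int) == week) = false := by simp; omega
         have b5 : ((5 : Int) == week) = false := by simp; omega
         have b6 : ((6 : Int) == week) = false := by simp; omega
         have hg : ¬ (1 ≤ week ∧ week ≤ 6) := by omega
         simp [scenario_one_route_actions_py, scenario_one_route_actions_py_alt, pvSchedule,
               pvActionNames, pvFilterA, PySem.Dict.getD, PySem.Dict.get?,
               b1, b2, b3, b4, b5, b6, hg])
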